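-- pv_equiv track=rewrite | github.com/paveleroshkinweb/algorithms | python-algorithms/src/problems/xor.py | triple_xor
-- ===== SOURCE A (Python) =====
-- def triple_xor(number):
--     pairs = [[(0, 0), (1, 0), (1, 1)], [(0, 0), (0, 1), (0, 2)]]
--     first_number = second_number = '1'
--     max_obtained = 0
--     for i in number[1:]:
--         pair = pairs[max_obtained]
--         first_number += str(pair[i][0])
--         second_number += str(pair[i][1])
--         max_obtained = max_obtained or int(pair[i][0] - pair[i][1] == 1)
--     return first_number, second_number
-- ===== SOURCE B (Python) =====
-- def triple_xor(number):
--     tail = number[1:]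
--     try:
--         j = tail.index(1)
--     except ValueError:
--         j = len(tail)
--     pre = {0: ('0', '0'), 1: ('1', '0'), 2: ('1', '1')}
--     post = {0: ('0', '0'), 1: ('0', '1'), 2: ('0', '2')}
--     parts = [pre[d] for d in tail[:j + 1]] + [post[d] for d in tail[j + 1:]]
--     first = '1' + ''.join(f for f, _ in parts)
--     second = '1' + ''.join(s for _, s in parts)
--     return first, second
-- ===== Notes on version B (the rewrite author's own statement) =====
-- stated objective: alternative
-- what changed: A runs a two-state state machine over the digits, switching lookup tables when it sees the first 1; B instead locates the first 1 with list.index, splits the tail into prefix and suffix slices, maps each segment through a fixed dict, and joins the columns into the two strings.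
-- outside the precondition, e.g. on triple_xor([0, -1]): A returns ('11', '11'), B raises KeyError; on triple_xor([0, 3]): A raises IndexError, B raises KeyError
import Mathlib
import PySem

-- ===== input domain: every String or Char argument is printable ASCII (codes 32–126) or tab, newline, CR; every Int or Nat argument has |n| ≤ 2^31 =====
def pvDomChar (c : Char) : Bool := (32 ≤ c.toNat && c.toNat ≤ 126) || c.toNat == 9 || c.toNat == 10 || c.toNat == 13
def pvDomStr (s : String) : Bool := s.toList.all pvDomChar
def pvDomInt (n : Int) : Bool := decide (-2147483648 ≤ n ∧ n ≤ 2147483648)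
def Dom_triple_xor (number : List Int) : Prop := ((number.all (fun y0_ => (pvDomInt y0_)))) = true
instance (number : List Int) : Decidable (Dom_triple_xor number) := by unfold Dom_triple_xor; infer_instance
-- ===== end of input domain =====

-- B replaces A's two-state table-switching loop by find-first-1, two segment maps and a join; alternative decomposition, same cost.


-- ===== PORT A =====
-- the constant `pairs` table of A
def pvPairsA : List (List (Int × Int)) := [[(0,0),(1,0),(1,1)], [(0,0),(0,1),(0,2)]]

-- one iteration of A's loop; `none` = IndexError (bad state index or digit outside range)
def pvStepA (st : Option (String × String × Int)) (i : Int) : Option (String × String × Int) :=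
  match st with
  | none => none
  | some (f, s, m) =>
    match PySem.List.pyGet? pvPairsA m with
    | none => none
    | some pair =>
      match PySem.List.pyGet? pair i with
      | none => none
      | some pr =>
        some (f ++ PySem.Int.toStr pr.1, s ++ PySem.Int.toStr pr.2,
              if m ≠ 0 then m else if pr.1 - pr.2 = 1 then 1 else 0)

def triple_xor (number : List Int) : String × String :=
  match (PySem.List.slice number (some 1) none).foldl pvStepA (some ("1", "1", 0)) with
  | some (f, s, _) => (f, s)
  | none => ("", "")   -- A raises IndexError here; excluded by Pre_

-- ===== PORT B =====
def pvPreDict : PySem.Dict Int (String × String) :=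
  PySem.Dict.ofList [(0, ("0","0")), (1, ("1","0")), (2, ("1","1"))]
def pvPostDict : PySem.Dict Int (String × String) :=
  PySem.Dict.ofList [(0, ("0","0")), (1, ("0","1")), (2, ("0","2"))]

def triple_xor_alt (number : List Int) : String × String :=
  let tail := PySem.List.slice number (some 1) none
  let j : Nat :=
    match PySem.List.index? tail 1 with   -- try: tail.index(1) except ValueError: len(tail)
    | some j => j
    | none => tail.length
  match (PySem.List.slice tail none (some ((j : Int) + 1))).mapM pvPreDict.get?,
        (PySem.List.slice tail (some ((j : Int) + 1)) none).mapM pvPostDict.get? with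
  | some ps, some qs =>
    let parts := ps ++ qs
    ("1" ++ PySem.Str.join "" (parts.map Prod.fst),
     "1" ++ PySem.Str.join "" (parts.map Prod.snd))
  | _, _ => ("", "")   -- B raises KeyError here; excluded by Pre_

-- ===== PRECONDITION & SPEC =====
-- Pre_ excludes digits outside {0,1,2} in number[1:]: on digits in {-3,-2,-1} A still returns via
-- Python's negative-index wraparound into its tables (an accident of the representation) while B's
-- dict lookup raises KeyError, and on any other digit A raises IndexError.
def Pre_triple_xor (number : List Int) : Prop := ∀ d ∈ number.tail, d = 0 ∨ d = 1 ∨ d = 2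
instance (number : List Int) : Decidable (Pre_triple_xor number) := by unfold Pre_triple_xor; infer_instance
def pvWitness_triple_xor : List Int := [7, 0, 1, 2, 1, 0]
def Spec_triple_xor (number : List Int) (out : String × String) : Prop := out = triple_xor_alt number
instance (number : List Int) (out : String × String) : Decidable (Spec_triple_xor number out) := by unfold Spec_triple_xor; infer_instance

-- ===== CLAIM (what is proved, stated in full; the proofs are below) =====
def Claim_equal_triple_xor : Prop := ∀ (number : List Int), Dom_triple_xor number → Pre_triple_xor number → Spec_triple_xor number (triple_xor number)

-- ===== LEMMAS AND PROOFS =====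

-- the pair appended for a digit before (and at) the first 1, and after it
def pvPreFn (d : Int) : String × String := if d = 1 then ("1","0") else if d = 2 then ("1","1") else ("0","0")
def pvPostFn (d : Int) : String × String := if d = 1 then ("0","1") else if d = 2 then ("0","2") else ("0","0")

-- the column pairs produced for a digit list, phrased as A produces them
def pvParts : List Int → List (String × String)
  | [] => []
  | d :: r => if d = 1 then ("1","0") :: r.map pvPostFn else pvPreFn d :: pvParts r

def pvJOf (t : List Int) : Nat :=
  match PySem.List.index? t 1 with
  | some j => j
  | none => t.length

theorem pvJoinE_cons (x : String) (l : List String) :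
    PySem.Str.join "" (x :: l) = x ++ PySem.Str.join "" l := by
  apply String.ext
  cases l with
  | nil =>
    simp [PySem.Str.toList_join, PySem.Chars.join, List.intercalate]
  | cons y r =>
    simp [PySem.Str.toList_join, PySem.Chars.join_cons_cons]

theorem pvJoinE_nil : PySem.Str.join "" ([] : List String) = "" := by decide

theorem pvFoldA_one (t : List Int) (hp : ∀ d ∈ t, d = 0 ∨ d = 1 ∨ d = 2) (f s : String) :
    t.foldl pvStepA (some (f, s, 1)) =
      some (f ++ PySem.Str.join "" ((t.map pvPostFn).map Prod.fst),
            s ++ PySem.Str.join "" ((t.map pvPostFn).map Prod.snd), 1) := by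
  induction t generalizing f s with
  | nil => simp [pvJoinE_nil]
  | cons d r ih =>
    have hd := hp d (by simp)
    have hr : ∀ x ∈ r, x = 0 ∨ x = 1 ∨ x = 2 := fun x hx => hp x (by simp [hx])
    rcases hd with h | h | h <;> subst h <;>
      simp only [List.foldl_cons, List.map_cons, pvJoinE_cons] <;>
      rw [show ∀ f s : String, pvStepA (some (f, s, 1)) _ = some (f ++ _, s ++ _, 1) from fun _ _ => rfl] <;>
      rw [ih hr] <;> simp [pvPostFn, String.append_assoc] <;> decide

theorem pvFoldA_zero (t : List Int) (hp : ∀ d ∈ t, d = 0 ∨ d = 1 ∨ d = 2) (f s : String) :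
    t.foldl pvStepA (some (f, s, 0)) =
      some (f ++ PySem.Str.join "" ((pvParts t).map Prod.fst),
            s ++ PySem.Str.join "" ((pvParts t).map Prod.snd),
            if 1 ∈ t then 1 else 0) := by
  induction t generalizing f s with
  | nil => simp [pvParts, pvJoinE_nil]
  | cons d r ih =>
    have hd := hp d (by simp)
    have hr : ∀ x ∈ r, x = 0 ∨ x = 1 ∨ x = 2 := fun x hx => hp x (by simp [hx])
    rcases hd with h | h | h <;> subst h
    · simp only [List.foldl_cons]
      rw [show ∀ f s : String, pvStepA (some (f, s, 0)) 0 = some (f ++ "0", s ++ "0", 0) from fun _ _ => rfl]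
      rw [ih hr]
      simp [pvParts, pvPreFn, pvJoinE_cons, String.append_assoc]
    · simp only [List.foldl_cons]
      rw [show ∀ f s : String, pvStepA (some (f, s, 0)) 1 = some (f ++ "1", s ++ "0", 1) from fun _ _ => rfl]
      rw [pvFoldA_one r hr]
      simp [pvParts, pvJoinE_cons, String.append_assoc]
    · simp only [List.foldl_cons]
      rw [show ∀ f s : String, pvStepA (some (f, s, 0)) 2 = some (f ++ "1", s ++ "1", 0) from fun _ _ => rfl]
      rw [ih hr]
      simp [pvParts, pvPreFn, pvJoinE_cons, String.append_assoc]

theorem pvMapM_pre (l : List Int) (hp : ∀ d ∈ l, d = 0 ∨ d = 1 ∨ d = 2) :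
    l.mapM pvPreDict.get? = some (l.map pvPreFn) := by
  induction l with
  | nil => rfl
  | cons d r ih =>
    have hd := hp d (by simp)
    have hr : ∀ x ∈ r, x = 0 ∨ x = 1 ∨ x = 2 := fun x hx => hp x (by simp [hx])
    have h1 : pvPreDict.get? d = some (pvPreFn d) := by
      rcases hd with h | h | h <;> subst h <;> decide
    simp [List.mapM_cons, h1, ih hr, pvPreFn]

theorem pvMapM_post (l : List Int) (hp : ∀ d ∈ l, d = 0 ∨ d = 1 ∨ d = 2) :
    l.mapM pvPostDict.get? = some (l.map pvPostFn) := by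
  induction l with
  | nil => rfl
  | cons d r ih =>
    have hd := hp d (by simp)
    have hr : ∀ x ∈ r, x = 0 ∨ x = 1 ∨ x = 2 := fun x hx => hp x (by simp [hx])
    have h1 : pvPostDict.get? d = some (pvPostFn d) := by
      rcases hd with h | h | h <;> subst h <;> decide
    simp [List.mapM_cons, h1, ih hr, pvPostFn]

theorem pvParts_eq (t : List Int) :
    pvParts t = (t.take (pvJOf t + 1)).map pvPreFn ++ (t.drop (pvJOf t + 1)).map pvPostFn := by
  induction t with
  | nil => simp [pvParts, pvJOf, PySem.List.index?]
  | cons d r ih =>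
    by_cases h1 : d = 1
    · subst h1
      have : pvJOf (1 :: r) = 0 := by
        unfold pvJOf
        rw [PySem.List.index?_cons_self]
      simp [pvParts, this, pvPreFn]
    · have hj : pvJOf (d :: r) = pvJOf r + 1 := by
        unfold pvJOf
        rw [PySem.List.index?_cons_of_ne _ h1]
        cases PySem.List.index? r 1 <;> simp
      rw [pvParts, if_neg h1, hj]
      simp only [List.take_succ_cons, List.drop_succ_cons, List.map_cons, List.cons_append]
      rw [ih]

theorem triple_xor_eq (number : List Int) (hp : Pre_triple_xor number) :
    triple_xor number = triple_xor_alt number := by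
  unfold triple_xor triple_xor_alt
  rw [PySem.List.slice_from_one]
  have hp' : ∀ d ∈ number.tail, d = 0 ∨ d = 1 ∨ d = 2 := hp
  set t := number.tail with ht
  rw [pvFoldA_zero t hp']
  have hcast : ((pvJOf t : Int) + 1) = ((pvJOf t + 1 : Nat) : Int) := by push_cast; ring
  have hseg1 : PySem.List.slice t none (some ((pvJOf t : Int) + 1)) = t.take (pvJOf t + 1) := by
    rw [hcast, PySem.List.slice_to_natCast]
  have hseg2 : PySem.List.slice t (some ((pvJOf t : Int) + 1)) none = t.drop (pvJOf t + 1) := by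
    rw [hcast, PySem.List.slice_from_natCast]
  have hj : (match PySem.List.index? t 1 with
             | some j => j
             | none => t.length) = pvJOf t := rfl
  simp only [hj, hseg1, hseg2]
  rw [pvMapM_pre _ (fun x hx => hp' x (List.mem_of_mem_take hx)),
      pvMapM_post _ (fun x hx => hp' x (List.mem_of_mem_drop hx))]
  simp only [← pvParts_eq t]

-- ===== VERDICT (by name: the statement is the Claim_ definition above) =====
theorem triple_xor_spec : Claim_equal_triple_xor := by
  intro number _ hpre
  unfold Spec_triple_xor
  exact triple_xor_eq number hpre
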